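-- pv_equiv track=rewrite | github.com/zzx060827/dsa2025 | openjudge/8758/2200016628.py | convert
-- ===== SOURCE A (Python) =====
-- def convert(n):
--     if n == 0:
--         return "0"
--     if n == 1:
--         return "2(0)"
--     if n == 2:
--         return "2"
--
--     res = []
--     power = 0
--     while n > 0:
--         if n % 2 == 1:
--             if power == 0:
--                 res.append("2(0)")
--             elif power == 1:
--                 res.append("2")
--             else:
--                 res.append(f"2({convert(power)})")
--         n //= 2
--         power += 1
--     return '+'.join(reversed(res))
-- ===== SOURCE B (Python) =====
-- def convert(n):
--     if n < 0:
--         return ""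
--     if n == 0:
--         return "0"
--     p = n.bit_length() - 1
--     if p == 0:
--         head = "2(0)"
--     elif p == 1:
--         head = "2"
--     else:
--         head = "2(" + convert(p) + ")"
--     rest = n - (1 << p)
--     return head if rest == 0 else head + "+" + convert(rest)
-- ===== Notes on version B (the rewrite author's own statement) =====
-- stated objective: simpler
-- what changed: A loops over all bits from the lowest up, appending a term per set bit and finally reversing and joining the list; B is a direct recursion that peels the highest set bit (via bit_length) and recurses on the remainder, producing the string front-to-back with no list, no reversal and no join.
import Mathlib
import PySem

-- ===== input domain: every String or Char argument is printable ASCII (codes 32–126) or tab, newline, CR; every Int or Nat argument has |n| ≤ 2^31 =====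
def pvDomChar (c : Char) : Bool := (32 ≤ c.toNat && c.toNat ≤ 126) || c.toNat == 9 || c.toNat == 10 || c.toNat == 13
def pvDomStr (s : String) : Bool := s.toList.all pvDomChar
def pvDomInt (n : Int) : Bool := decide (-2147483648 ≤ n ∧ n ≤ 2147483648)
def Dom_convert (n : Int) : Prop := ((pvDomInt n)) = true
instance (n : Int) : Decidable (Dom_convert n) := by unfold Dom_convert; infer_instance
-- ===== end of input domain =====

-- B replaces A's low-to-high bit loop + reversed join by a recursion that peels the highest
-- set bit first (objective: simpler decomposition, same exact output including "" for n < 0).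

-- termination helper for the ports (cited in decreasing_by)
theorem pvTwoMulLeTwoPow : ∀ p : Nat, 2 * p ≤ 2 ^ p := by
  intro p
  induction p with
  | zero => simp
  | succ k ih =>
    rcases Nat.eq_zero_or_pos k with hk | hk
    · subst hk; simp
    · have h2 : (2:Nat) ≤ 2 ^ k := by
        calc (2:Nat) = 2 ^ 1 := (pow_one 2).symm
          _ ≤ 2 ^ k := Nat.pow_le_pow_right (by omega) hk
      calc 2 * (k + 1) = 2 * k + 2 := by ring
        _ ≤ 2 ^ k + 2 ^ k := by omega
        _ = 2 ^ (k + 1) := by ring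

-- ===== PORT A =====
-- Python A: special-cases 0/1/2, then a while-loop collecting one term per set bit from the
-- lowest bit up (recursing into convert for the exponent), finally '+'.join(reversed(res)).
mutual
def convert (n : Int) : String :=
  if n = 0 then "0"
  else if n = 1 then "2(0)"
  else if n = 2 then "2"
  else PySem.Str.join "+" (convertLoop n 0 []).reverse
termination_by 3 * n.toNat + 1
decreasing_by
  simp only [pow_zero]; omega

def convertLoop (n : Int) (power : Nat) (res : List String) : List String :=
  if h : 0 < n then
    let res' :=
      if PySem.Int.mod n 2 = 1 then
        if power = 0 then res ++ ["2(0)"]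
        else if power = 1 then res ++ ["2"]
        else res ++ ["2(" ++ convert (power : Int) ++ ")"]
      else res
    convertLoop (PySem.Int.floordiv n 2) (power + 1) res'
  else res
termination_by n.toNat * 2 ^ power + 2 * n.toNat + power
decreasing_by
  · -- inner recursive call convert power
    have hm : 1 ≤ n.toNat := by omega
    have h2p : 2 * power ≤ 2 ^ power := pvTwoMulLeTwoPow power
    have : 2 ^ power ≤ n.toNat * 2 ^ power := Nat.le_mul_of_pos_left _ hm
    omega
  · -- loop self-call on n // 2
    have hm : 1 ≤ n.toNat := by omega
    rw [PySem.Int.floordiv_eq_ediv_of_pos (by omega : (0:Int) < 2)]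
    have hdt : (n / 2).toNat = n.toNat / 2 := by omega
    rw [hdt]
    generalize n.toNat = m at hm ⊢
    have hq : 1 ≤ 2 ^ power := Nat.one_le_two_pow
    have hrw : m / 2 * 2 ^ (power + 1) = (2 * (m / 2)) * 2 ^ power := by ring
    rw [hrw]
    by_cases hpar : m % 2 = 0
    · have h1 : 2 * (m / 2) = m := by omega
      rw [h1]
      have hm2 : 2 ≤ m := by omega
      omega

    · have h1 : 2 * (m / 2) = m - 1 := by omega
      rw [h1]
      have h2 : (m - 1) * 2 ^ power + 2 ^ power = m * 2 ^ power := by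
        obtain ⟨m', rfl⟩ : ∃ m', m = m' + 1 := ⟨m - 1, by omega⟩
        rw [Nat.add_sub_cancel, add_mul, one_mul]
      omega
end

-- ===== PORT B =====
-- Python B: recursion that peels the highest set bit: p = n.bit_length()-1, head for 2^p
-- (recursing into convert for the exponent), then recurse on the remainder n - 2^p.
def convert_alt (n : Int) : String :=
  if n < 0 then ""
  else if n = 0 then "0"
  else
    let p : Nat := PySem.Int.bitLength n - 1
    let head : String :=
      if p = 0 then "2(0)"
      else if p = 1 then "2"
      else "2(" ++ convert_alt (p : Int) ++ ")"
    let rest : Int := n - 2 ^ p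
    if rest = 0 then head else head ++ "+" ++ convert_alt rest
termination_by n.toNat
decreasing_by
  · -- exponent call: p < n.toNat
    have hpos : 0 < n := by omega
    have hle : 2 ^ (PySem.Int.bitLength n - 1) ≤ n.natAbs :=
      PySem.Int.two_pow_bitLength_le n (by omega)
    have hlt := Nat.lt_two_pow_self (n := PySem.Int.bitLength n - 1)
    simp only [Int.toNat_natCast]
    omega
  · -- remainder call: (n - 2^p).toNat < n.toNat
    have hpos : 0 < n := by omega
    have hle : 2 ^ (PySem.Int.bitLength n - 1) ≤ n.natAbs :=
      PySem.Int.two_pow_bitLength_le n (by omega)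
    have h2 : (2:Int) ^ (PySem.Int.bitLength n - 1) ≤ n := by
      calc (2:Int) ^ (PySem.Int.bitLength n - 1)
          = ((2 ^ (PySem.Int.bitLength n - 1) : Nat) : Int) := by push_cast; ring
        _ ≤ (n.natAbs : Int) := by exact_mod_cast hle
        _ = n := by omega
    have h1 : (1:Int) ≤ 2 ^ (PySem.Int.bitLength n - 1) := one_le_pow₀ (by omega)
    omega

-- ===== PRECONDITION & SPEC =====
def Spec_convert (n : Int) (out : String) : Prop := out = convert_alt n
instance (n : Int) (out : String) : Decidable (Spec_convert n out) := by unfold Spec_convert; infer_instance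

-- ===== CLAIM (what is proved, stated in full; the proofs are below) =====
def Claim_equal_convert : Prop := ∀ (n : Int), Dom_convert n → Spec_convert n (convert n)

-- ===== LEMMAS AND PROOFS =====

-- the string B produces for the single bit 2^p (matches both A's appended term and B's head)
def pvTerm (p : Nat) : String :=
  if p = 0 then "2(0)" else if p = 1 then "2" else "2(" ++ convert_alt (p : Int) ++ ")"

-- the low-to-high list of terms A's loop accumulates, with convert replaced by convert_alt
def pvTermsLow (m p : Nat) : List String :=
  if m = 0 then []
  else (if m % 2 = 1 then [pvTerm p] else []) ++ pvTermsLow (m / 2) (p + 1)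
termination_by m
decreasing_by exact Nat.div_lt_self (by omega) (by omega)

theorem pvTermsLow_zero (p : Nat) : pvTermsLow 0 p = [] := by
  rw [pvTermsLow]; simp

theorem pvJoin_singleton (s : String) : PySem.Str.join "+" [s] = s := by
  simp [PySem.Str.join]

theorem pvJoin_cons (s t : String) (ts : List String) :
    PySem.Str.join "+" (s :: t :: ts) = s ++ "+" ++ PySem.Str.join "+" (t :: ts) := by
  simp [PySem.Str.join, PySem.Chars.join_cons_cons, String.append_assoc]
  rw [show ('+' :: PySem.Chars.join ['+'] (t.toList :: List.map String.toList ts))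
        = ['+'] ++ PySem.Chars.join ['+'] (t.toList :: List.map String.toList ts) from rfl,
     String.ofList_append]

theorem pvTermsLow_ne_nil : ∀ m, 1 ≤ m → ∀ p : Nat, pvTermsLow m p ≠ [] := by
  intro m
  induction m using Nat.strong_induction_on with
  | _ m ih =>
    intro hm p
    rw [pvTermsLow]
    have hm0 : ¬ m = 0 := by omega
    simp only [hm0, if_false]
    by_cases hpar : m % 2 = 1
    · simp [hpar]
    · have hd : 1 ≤ m / 2 := by omega
      have := ih (m / 2) (Nat.div_lt_self (by omega) (by omega)) hd (p + 1)
      simp [hpar, this]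

theorem pvBitLength_pos (m : Nat) (hm : 1 ≤ m) : 1 ≤ PySem.Int.bitLength (m : Int) := by
  rw [PySem.Int.bitLength_natCast (by omega : 0 < m)]
  omega

-- peel the highest set bit off pvTermsLow
theorem pvTermsLow_peel : ∀ m, 1 ≤ m → ∀ p : Nat,
    pvTermsLow m p =
      pvTermsLow (m - 2 ^ (PySem.Int.bitLength (m : Int) - 1)) p
        ++ [pvTerm (p + (PySem.Int.bitLength (m : Int) - 1))] := by
  intro m
  induction m using Nat.strong_induction_on with
  | _ m ih =>
    intro hm p
    rcases Nat.lt_or_ge m 2 with h2 | h2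
    · have hm1 : m = 1 := by omega
      subst hm1
      have hb : PySem.Int.bitLength ((1:Nat) : Int) = 1 := by decide
      rw [hb]
      rw [pvTermsLow]
      norm_num [pvTermsLow_zero]
    · -- m ≥ 2
      have hd : 1 ≤ m / 2 := by omega
      have hb : PySem.Int.bitLength (m : Int) = PySem.Int.bitLength ((m / 2 : Nat) : Int) + 1 :=
        PySem.Int.bitLength_natCast (by omega : 0 < m)
      set b2 := PySem.Int.bitLength ((m / 2 : Nat) : Int) with hb2
      have hb2pos : 1 ≤ b2 := pvBitLength_pos _ hd
      have hle2 : 2 ^ (b2 - 1) ≤ m / 2 := by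
        have := PySem.Int.two_pow_bitLength_le ((m / 2 : Nat) : Int) (by
          simp only [ne_eq, Nat.cast_eq_zero]; omega)
        simpa [hb2] using this
      have hIH := ih (m / 2) (Nat.div_lt_self (by omega) (by omega)) hd (p + 1)
      set k := 2 ^ (b2 - 1) with hk
      have hkpos : 1 ≤ k := Nat.one_le_two_pow
      have hkm : 2 * k ≤ m := by
        have : 2 * k ≤ 2 * (m / 2) := by omega
        omega
      have hrsub : (m - 2 * k) / 2 = m / 2 - k := by omega
      have hrmod : (m - 2 * k) % 2 = m % 2 := by omega
      rw [pvTermsLow]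
      have hm0 : ¬ m = 0 := by omega
      simp only [hm0, if_false]
      rw [hIH]
      rw [hb]
      have hexp : p + 1 + (b2 - 1) = p + (b2 + 1 - 1) := by omega
      rw [hexp]
      have hrest : m - 2 ^ (b2 + 1 - 1) = m - 2 * k := by
        have : 2 ^ (b2 + 1 - 1) = 2 * k := by
          rw [hk, show b2 + 1 - 1 = (b2 - 1) + 1 from by omega]
          ring
        omega
      rw [hrest]
      conv_rhs => rw [pvTermsLow]
      rcases Nat.eq_zero_or_pos (m - 2 * k) with hz | hz
      · have hmod0 : m % 2 = 0 := by omega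
        have hhalf : m / 2 - k = 0 := by omega
        rw [hhalf] at *
        simp [hz, hmod0, pvTermsLow_zero]
      · have hz' : ¬ (m - 2 * k) = 0 := by omega
        simp only [hz', if_false]
        rw [hrsub, hrmod]
        simp [List.append_assoc]

-- joining pvTermsLow back-to-front is exactly B's recursion
theorem pvJoin_termsLow : ∀ m, 1 ≤ m →
    PySem.Str.join "+" (pvTermsLow m 0).reverse = convert_alt (m : Int) := by
  intro m
  induction m using Nat.strong_induction_on with
  | _ m ih =>
    intro hm
    rw [convert_alt]
    have h1 : ¬ ((m : Int) < 0) := by omega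
    have h2 : ¬ ((m : Int) = 0) := by exact_mod_cast (by omega : ¬ m = 0)
    rw [if_neg h1, if_neg h2]
    set b1 := PySem.Int.bitLength (m : Int) - 1 with hb1
    have hle : 2 ^ b1 ≤ m := by
      have := PySem.Int.two_pow_bitLength_le (m : Int) (by
        simp only [ne_eq, Nat.cast_eq_zero]; omega)
      simpa [hb1] using this
    have hkpos : 1 ≤ 2 ^ b1 := Nat.one_le_two_pow
    have hrestInt : (m : Int) - 2 ^ b1 = ((m - 2 ^ b1 : Nat) : Int) := by push_cast [hle]; ring
    rw [pvTermsLow_peel m hm 0]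
    simp only [List.reverse_append, List.reverse_cons, List.reverse_nil, List.nil_append,
      List.singleton_append, ← hb1, Nat.zero_add]
    rcases Nat.eq_zero_or_pos (m - 2 ^ b1) with hz | hz
    · rw [hz, pvTermsLow_zero]
      simp only [List.reverse_nil]
      rw [pvJoin_singleton]
      have hz0 : (m : Int) - 2 ^ b1 = 0 := by rw [hrestInt, hz]; simp
      rw [if_pos hz0]
      simp [pvTerm]
    · have hne := pvTermsLow_ne_nil (m - 2 ^ b1) hz 0
      obtain ⟨t, ts, hts⟩ : ∃ t ts, (pvTermsLow (m - 2 ^ b1) 0).reverse = t :: ts := by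
        rcases hrev : (pvTermsLow (m - 2 ^ b1) 0).reverse with _ | ⟨t, ts⟩
        · exact absurd (by simpa using congrArg List.reverse hrev) hne
        · exact ⟨t, ts, rfl⟩
      rw [hts, pvJoin_cons, ← hts]
      rw [ih (m - 2 ^ b1) (by omega) hz]
      have hne0 : ¬ ((m : Int) - 2 ^ b1 = 0) := by
        rw [hrestInt]
        exact_mod_cast (by omega : ¬ (m - 2 ^ b1 = 0))
      rw [if_neg hne0, hrestInt]
      simp [pvTerm]

-- A's loop accumulates res ++ pvTermsLow, once every inner convert call is rewritten via H
theorem pvLoop_eq (N : Nat) (H : ∀ k : Nat, k < N → convert (k : Int) = convert_alt (k : Int)) :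
    ∀ m, ∀ p : Nat, ∀ res : List String,
      m * 2 ^ p ≤ N → convertLoop (m : Int) p res = res ++ pvTermsLow m p := by
  intro m
  induction m using Nat.strong_induction_on with
  | _ m ih =>
    intro p res hN
    rcases Nat.eq_zero_or_pos m with hz | hpos
    · subst hz
      rw [convertLoop, pvTermsLow_zero]
      simp
    · rw [convertLoop]
      have h0 : (0:Int) < (m : Int) := by exact_mod_cast hpos
      rw [dif_pos h0]
      have hmod : PySem.Int.mod (m : Int) 2 = ((m % 2 : Nat) : Int) := by
        exact_mod_cast PySem.Int.mod_natCast m 2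
      have hdiv : PySem.Int.floordiv (m : Int) 2 = ((m / 2 : Nat) : Int) := by
        exact_mod_cast PySem.Int.floordiv_natCast m 2
      have hcond : (PySem.Int.mod (m : Int) 2 = 1) ↔ m % 2 = 1 := by
        rw [hmod]
        exact_mod_cast Int.natCast_inj (m := m % 2) (n := 1)
      have hIH := ih (m / 2) (Nat.div_lt_self (by omega) (by omega)) (p + 1)
      have hN' : m / 2 * 2 ^ (p + 1) ≤ N := by
        have he : m / 2 * 2 ^ (p + 1) = (2 * (m / 2)) * 2 ^ p := by ring
        rw [he]
        calc (2 * (m / 2)) * 2 ^ p ≤ m * 2 ^ p := Nat.mul_le_mul_right _ (by omega)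
          _ ≤ N := hN
      rw [hdiv]
      rw [pvTermsLow]
      have hm0 : ¬ m = 0 := by omega
      simp only [hm0, if_false]
      by_cases hpar : m % 2 = 1
      · have hcv : convert (p : Int) = convert_alt (p : Int) := by
          apply H
          have h2p : p < 2 ^ p := Nat.lt_two_pow_self
          have : 2 ^ p ≤ m * 2 ^ p := Nat.le_mul_of_pos_left _ hpos
          omega
        rw [if_pos (hcond.mpr hpar)]
        simp only [hpar]
        by_cases hp0 : p = 0
        · subst hp0
          rw [if_pos rfl, hIH _ hN']
          simp [pvTerm, List.append_assoc]
        · rw [if_neg hp0]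
          by_cases hp1 : p = 1
          · subst hp1
            rw [if_pos rfl, hIH _ hN']
            simp [pvTerm, List.append_assoc]
          · rw [if_neg hp1, hcv, hIH _ hN']
            simp [pvTerm, hp0, hp1, List.append_assoc]
      · rw [if_neg (by rw [hcond]; exact hpar)]
        simp only [hpar, if_false]
        rw [hIH _ hN']
        simp

theorem pvBase0 : convert ((0:Nat) : Int) = convert_alt ((0:Nat) : Int) := by
  rw [convert, convert_alt]; norm_num

theorem pvBase1 : convert ((1:Nat) : Int) = convert_alt ((1:Nat) : Int) := by
  have hb : PySem.Int.bitLength (1:Int) = 1 := by decide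
  rw [convert, convert_alt]
  norm_num [hb]

theorem pvBase2 : convert ((2:Nat) : Int) = convert_alt ((2:Nat) : Int) := by
  have hb : PySem.Int.bitLength (2:Int) = 2 := by decide
  rw [convert, convert_alt]
  norm_num [hb]

theorem pvMain : ∀ m : Nat, convert (m : Int) = convert_alt (m : Int) := by
  intro m
  induction m using Nat.strong_induction_on with
  | _ m ih =>
    rcases Nat.lt_or_ge m 3 with h3 | h3
    · interval_cases m
      · exact pvBase0
      · exact pvBase1
      · exact pvBase2
    · rw [convert]
      have h0 : ¬ ((m : Int) = 0) := by exact_mod_cast (by omega : ¬ m = 0)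
      have h1 : ¬ ((m : Int) = 1) := by exact_mod_cast (by omega : ¬ m = 1)
      have h2 : ¬ ((m : Int) = 2) := by exact_mod_cast (by omega : ¬ m = 2)
      rw [if_neg h0, if_neg h1, if_neg h2]
      rw [pvLoop_eq m ih m 0 [] (by simp)]
      simp only [List.nil_append]
      exact pvJoin_termsLow m (by omega)

theorem pvNeg (n : Int) (hn : n < 0) : convert n = convert_alt n := by
  rw [convert, convert_alt]
  rw [if_neg (by omega), if_neg (by omega), if_neg (by omega), if_pos hn]
  rw [convertLoop, dif_neg (by omega)]
  simp [PySem.Str.join, PySem.Chars.join_nil]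

-- ===== VERDICT (by name: the statement is the Claim_ definition above) =====
theorem convert_spec : Claim_equal_convert := by
  intro n _
  unfold Spec_convert
  rcases Int.lt_or_le n 0 with hn | hn
  · exact pvNeg n hn
  · have hcast : n = ((n.toNat : Nat) : Int) := by omega
    rw [hcast]
    exact pvMain n.toNat
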